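-- pv_equiv track=rewrite | github.com/M00NZ1/ex-skill-public | apps/local_chat/services/llm_client.py | _turns_since_last_assistant_sticker
-- ===== SOURCE A (Python) =====
-- from typing import Dict, List
--
-- def _turns_since_last_assistant_sticker(history: List[Dict]) -> int:
--     """计算距离上一条带表情包的助手消息有多少轮。"""
--     turns = 0
--     for item in reversed(history):
--         if item.get('role') != 'assistant':
--             continue
--         sticker_md5 = str(item.get('sticker_md5', '') or '').strip()
--         if sticker_md5:
--             return turns
--         turns += 1
--     return 999
-- ===== SOURCE B (Python) =====
-- from typing import Dict, List
--
-- def _turns_since_last_assistant_sticker(history: List[Dict]) -> int: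
--     """Forward single pass: reset counter at each assistant sticker message."""
--     turns = 0
--     found = False
--     for item in history:
--         if item.get('role') != 'assistant':
--             continue
--         if str(item.get('sticker_md5', '') or '').strip():
--             turns = 0
--             found = True
--         else:
--             turns += 1
--     return turns if found else 999
-- ===== Notes on version B (the rewrite author's own statement) =====
-- stated objective: alternative
-- what changed: Replaces the reverse early-exit scan with a single forward pass maintaining a counter and a found flag (counter reset at each assistant sticker message).
import Mathlib
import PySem

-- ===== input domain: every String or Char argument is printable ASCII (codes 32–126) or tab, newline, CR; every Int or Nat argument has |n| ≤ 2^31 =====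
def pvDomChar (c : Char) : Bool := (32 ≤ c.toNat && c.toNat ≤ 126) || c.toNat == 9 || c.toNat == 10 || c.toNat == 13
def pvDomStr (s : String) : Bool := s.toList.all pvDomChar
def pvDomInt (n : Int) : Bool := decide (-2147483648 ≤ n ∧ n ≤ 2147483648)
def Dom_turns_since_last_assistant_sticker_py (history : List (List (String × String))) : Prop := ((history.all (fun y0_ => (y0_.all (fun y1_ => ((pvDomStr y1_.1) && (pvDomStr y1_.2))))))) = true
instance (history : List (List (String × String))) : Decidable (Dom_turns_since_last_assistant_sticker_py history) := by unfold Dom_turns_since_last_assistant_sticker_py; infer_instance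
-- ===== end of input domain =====

-- B replaces A's reverse early-exit scan by one forward pass with a counter and a found flag (alternative decomposition, same cost).


-- shared primitive: item.get(key) on an association list (first match), as both Pythons use it
def pvGet? : List (String × String) → String → Option String
  | [], _ => none
  | (k, v) :: rest, key => if k == key then some v else pvGet? rest key

-- item.get('role') != 'assistant'  (negated: the item IS an assistant message)
def pvRoleIsAssistant (item : List (String × String)) : Bool :=
  pvGet? item "role" == some "assistant"

-- bool(str(item.get('sticker_md5','') or '').strip())  — on strings, `or ''` and `str` are identity
def pvStickerPresent (item : List (String × String)) : Bool :=
  !(PySem.Str.strip ((pvGet? item "sticker_md5").getD "") == "")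

-- ===== PORT A =====
-- for item in reversed(history): … early return of `turns` at the first assistant sticker message
def pvLoopA : List (List (String × String)) → Int → Int
  | [], _ => 999
  | item :: rest, turns =>
    if !(pvRoleIsAssistant item) then pvLoopA rest turns
    else if pvStickerPresent item then turns
    else pvLoopA rest (turns + 1)

def turns_since_last_assistant_sticker_py (history : List (List (String × String))) : Int :=
  pvLoopA history.reverse 0

-- ===== PORT B =====
-- forward fold carrying (turns, found)
def pvStepB (s : Int × Bool) (item : List (String × String)) : Int × Bool :=
  if !(pvRoleIsAssistant item) then s
  else if pvStickerPresent item then (0, true)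
  else (s.1 + 1, s.2)

def turns_since_last_assistant_sticker_py_alt (history : List (List (String × String))) : Int :=
  let s := history.foldl pvStepB (0, false)
  if s.2 then s.1 else 999

-- ===== PRECONDITION & SPEC =====
def Spec_turns_since_last_assistant_sticker_py (history : List (List (String × String))) (out : Int) : Prop := out = turns_since_last_assistant_sticker_py_alt history
instance (history : List (List (String × String))) (out : Int) : Decidable (Spec_turns_since_last_assistant_sticker_py history out) := by unfold Spec_turns_since_last_assistant_sticker_py; infer_instance

-- ===== CLAIM (what is proved, stated in full; the proofs are below) =====
def Claim_equal_turns_since_last_assistant_sticker_py : Prop := ∀ (history : List (List (String × String))), Dom_turns_since_last_assistant_sticker_py history → Spec_turns_since_last_assistant_sticker_py history (turns_since_last_assistant_sticker_py history)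

-- ===== LEMMAS AND PROOFS =====

-- does the list contain an assistant message with a sticker?
def pvHasStick (l : List (List (String × String))) : Bool :=
  l.any (fun x => pvRoleIsAssistant x && pvStickerPresent x)

-- number of assistant messages (none of which carries a sticker, in the case this is used)
def pvNA (l : List (List (String × String))) : Int :=
  (l.countP (fun x => pvRoleIsAssistant x) : Int)

theorem pvHasStick_reverse (l : List (List (String × String))) :
    pvHasStick l.reverse = pvHasStick l := by
  simp [pvHasStick, List.any_reverse]

theorem pvHasStick_cons (x : List (String × String)) (l : List (List (String × String))) :
    pvHasStick (x :: l) = ((pvRoleIsAssistant x && pvStickerPresent x) || pvHasStick l) := by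
  simp [pvHasStick, List.any_cons]

theorem pvLoopA_no_stick : ∀ (r : List (List (String × String))) (t : Int),
    pvHasStick r = false → pvLoopA r t = 999 := by
  intro r
  induction r with
  | nil => intro t _; rfl
  | cons x rest ih =>
    intro t h
    rw [pvHasStick_cons] at h
    have hx : (pvRoleIsAssistant x && pvStickerPresent x) = false ∧ pvHasStick rest = false := by
      simpa [Bool.or_eq_false_iff] using h
    by_cases hr : pvRoleIsAssistant x = true
    · have hs : pvStickerPresent x = false := by
        cases hsp : pvStickerPresent x
        · rfl
        · rw [hr, hsp] at hx; simp at hx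
      simp [pvLoopA, hr, hs]
      exact ih _ hx.2
    · simp at hr
      simp [pvLoopA, hr]
      exact ih _ hx.2

theorem pvLoopA_lin : ∀ (r : List (List (String × String))) (t : Int),
    pvHasStick r = true → pvLoopA r t = pvLoopA r 0 + t := by
  intro r
  induction r with
  | nil => intro t h; simp [pvHasStick] at h
  | cons x rest ih =>
    intro t h
    rw [pvHasStick_cons] at h
    by_cases hr : pvRoleIsAssistant x = true
    · by_cases hs : pvStickerPresent x = true
      · simp [pvLoopA, hr, hs]
      · simp at hs
        have hrest : pvHasStick rest = true := by
          rw [hr, hs] at h; simpa using h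
        simp [pvLoopA, hr, hs]
        rw [ih _ hrest, ih 1 hrest]
        ring
    · simp at hr
      have hrest : pvHasStick rest = true := by
        rw [hr] at h; simpa using h
      simp [pvLoopA, hr]
      exact ih _ hrest

theorem pvFoldB_main : ∀ (l : List (List (String × String))) (c : Int) (f : Bool),
    List.foldl pvStepB (c, f) l =
      if pvHasStick l then (pvLoopA l.reverse 0, true) else (c + pvNA l, f) := by
  intro l
  induction l using List.reverseRecOn with
  | nil => intro c f; simp [pvHasStick, pvNA]
  | append_singleton l x ih =>
    intro c f
    rw [List.foldl_append]
    have hrev : (l ++ [x]).reverse = x :: l.reverse := by simp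
    have hstk : pvHasStick (l ++ [x]) = (pvHasStick l || (pvRoleIsAssistant x && pvStickerPresent x)) := by
      simp [pvHasStick, List.any_append]
    by_cases hr : pvRoleIsAssistant x = true
    · by_cases hs : pvStickerPresent x = true
      · simp only [List.foldl_cons, List.foldl_nil, pvStepB, hr, hs]
        simp [hstk, hrev, hr, hs, pvLoopA]
      · simp at hs
        simp only [List.foldl_cons, List.foldl_nil, ih]
        by_cases hl : pvHasStick l = true
        · simp [pvStepB, hr, hs, hstk, hl, hrev, pvLoopA]
          rw [pvLoopA_lin _ 1 (by rw [pvHasStick_reverse]; exact hl)]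
        · simp at hl
          simp [pvStepB, hr, hs, hstk, hl, pvNA, List.countP_append, List.countP_cons]
          ring
    · simp at hr
      simp only [List.foldl_cons, List.foldl_nil, ih]
      by_cases hl : pvHasStick l = true
      · simp [pvStepB, hr, hstk, hl, hrev, pvLoopA]
      · simp at hl
        simp [pvStepB, hr, hstk, hl, pvNA, List.countP_append]

-- ===== VERDICT (by name: the statement is the Claim_ definition above) =====
theorem turns_since_last_assistant_sticker_py_spec : Claim_equal_turns_since_last_assistant_sticker_py := by
  intro history _
  unfold Spec_turns_since_last_assistant_sticker_py
  unfold turns_since_last_assistant_sticker_py turns_since_last_assistant_sticker_py_alt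
  rw [pvFoldB_main]
  cases h : pvHasStick history
  · simp
    exact pvLoopA_no_stick _ 0 (by rw [pvHasStick_reverse]; exact h)
  · simp
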